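-- pv_equiv track=rewrite | github.com/GuillaumeMulier/MarmotsTuesday | PathFinding/PathfindingAlgorithm.py | VoisinsAnneau
-- ===== SOURCE A (Python) =====
-- def VoisinsAnneau(rr, cc, RMax, CMax, RMin=0, CMin=0, Longueur=1):
--     """
--     Function that find coordinates of neighbours in cross
--     :param rr: row
--     :param cc: column
--     :param RMin, CMin: Minimum index of row and column
--     :param RMax, CMax: Maximum index of row and column
--     :param Longueur: distance of the ring from center
--     :return: list of tuples (row, column) of the neighbours
--     """
--     Res = []
--     Directions = []
--     for i in range(-Longueur, Longueur + 1):
--         for j in range(-Longueur, Longueur + 1):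
--             if (i, j) != (0, 0): Directions.append((i, j))
--     for re, ce in Directions:
--         rvois = rr + re
--         cvois = cc + ce
--         if rvois in range(RMin, RMax) and cvois in range(CMin, CMax):
--             Res.append((rvois, cvois))
--     return Res
-- ===== SOURCE B (Python) =====
-- def VoisinsAnneau(rr, cc, RMax, CMax, RMin=0, CMin=0, Longueur=1):
--     """Same neighbours, computed directly over the clamped row/column ranges
--     (no offset list, no per-candidate membership test)."""
--     res = []
--     for r in range(max(RMin, rr - Longueur), min(RMax, rr + Longueur + 1)):
--         for c in range(max(CMin, cc - Longueur), min(CMax, cc + Longueur + 1)):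
--             if (r, c) != (rr, cc):
--                 res.append((r, c))
--     return res
-- ===== Notes on version B (the rewrite author's own statement) =====
-- stated objective: simpler
-- what changed: B drops A's offset-list generation pass and per-candidate range-membership filtering, iterating directly over the clamped row and column index ranges and skipping only the center cell.
import Mathlib
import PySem

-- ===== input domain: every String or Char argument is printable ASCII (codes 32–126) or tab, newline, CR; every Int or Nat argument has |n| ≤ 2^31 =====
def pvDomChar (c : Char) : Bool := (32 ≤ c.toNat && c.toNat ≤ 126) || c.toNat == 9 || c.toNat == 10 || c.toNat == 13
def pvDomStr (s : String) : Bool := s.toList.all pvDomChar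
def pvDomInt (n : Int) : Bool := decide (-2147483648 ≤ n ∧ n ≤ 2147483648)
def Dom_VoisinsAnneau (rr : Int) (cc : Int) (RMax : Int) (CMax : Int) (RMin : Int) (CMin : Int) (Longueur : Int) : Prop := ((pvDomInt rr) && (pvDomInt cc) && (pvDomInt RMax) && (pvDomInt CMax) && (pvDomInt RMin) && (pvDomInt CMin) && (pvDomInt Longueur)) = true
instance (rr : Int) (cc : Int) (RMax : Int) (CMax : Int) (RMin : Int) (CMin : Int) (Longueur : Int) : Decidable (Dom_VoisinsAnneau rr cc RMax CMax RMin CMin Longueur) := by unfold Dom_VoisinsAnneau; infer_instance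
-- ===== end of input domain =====

-- B iterates directly over the clamped row/column index ranges instead of building A's
-- offset list and filtering every candidate by range membership (objective: simpler).

-- ===== PORT A =====
-- A-side helpers: each Python for-loop as the obvious structural recursion over its range,
-- emitting appended elements front-to-back in loop order.
-- inner 'for j: if (i, j) != (0, 0): Directions.append((i, j))'
def pvDirInner (i : Int) (js : List Int) : List (Int × Int) :=
  match js with
  | [] => []
  | j :: rest => if (i, j) ≠ ((0 : Int), (0 : Int)) then (i, j) :: pvDirInner i rest else pvDirInner i rest

-- outer 'for i in range(-Longueur, Longueur + 1)'
def pvDirections (is js : List Int) : List (Int × Int) :=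
  match is with
  | [] => []
  | i :: rest => pvDirInner i js ++ pvDirections rest js

-- 'for re, ce in Directions: … if rvois in range(RMin, RMax) and cvois in range(CMin, CMax): Res.append(…)'
-- (Python's 'rvois'/'cvois' locals are inlined.)
def pvResLoop (rr cc RMax CMax RMin CMin : Int) (ds : List (Int × Int)) : List (Int × Int) :=
  match ds with
  | [] => []
  | d :: rest =>
    if (RMin ≤ rr + d.1 ∧ rr + d.1 < RMax) ∧ (CMin ≤ cc + d.2 ∧ cc + d.2 < CMax) then
      (rr + d.1, cc + d.2) :: pvResLoop rr cc RMax CMax RMin CMin rest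
    else pvResLoop rr cc RMax CMax RMin CMin rest

def VoisinsAnneau (rr : Int) (cc : Int) (RMax : Int) (CMax : Int) (RMin : Int) (CMin : Int) (Longueur : Int) : List (Int × Int) :=
  pvResLoop rr cc RMax CMax RMin CMin
    (pvDirections (PySem.List.pyRange (-Longueur) (Longueur + 1) 1)
      (PySem.List.pyRange (-Longueur) (Longueur + 1) 1))

-- ===== PORT B =====
-- B-side helpers: the two clamped-range loops, same recursion style.
-- inner 'for c in range(max(CMin, cc - Longueur), min(CMax, cc + Longueur + 1)): if (r, c) != (rr, cc): res.append((r, c))'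
def pvColLoop (rr cc r : Int) (cs : List Int) : List (Int × Int) :=
  match cs with
  | [] => []
  | c :: rest => if (r, c) ≠ (rr, cc) then (r, c) :: pvColLoop rr cc r rest else pvColLoop rr cc r rest

-- outer 'for r in range(max(RMin, rr - Longueur), min(RMax, rr + Longueur + 1))'
def pvRowLoop (rr cc : Int) (cs : List Int) (rs : List Int) : List (Int × Int) :=
  match rs with
  | [] => []
  | r :: rest => pvColLoop rr cc r cs ++ pvRowLoop rr cc cs rest

def VoisinsAnneau_alt (rr : Int) (cc : Int) (RMax : Int) (CMax : Int) (RMin : Int) (CMin : Int) (Longueur : Int) : List (Int × Int) :=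
  pvRowLoop rr cc
    (PySem.List.pyRange (max CMin (cc - Longueur)) (min CMax (cc + Longueur + 1)) 1)
    (PySem.List.pyRange (max RMin (rr - Longueur)) (min RMax (rr + Longueur + 1)) 1)

-- ===== PRECONDITION & SPEC =====
def Spec_VoisinsAnneau (rr : Int) (cc : Int) (RMax : Int) (CMax : Int) (RMin : Int) (CMin : Int) (Longueur : Int) (out : List (Int × Int)) : Prop := out = VoisinsAnneau_alt rr cc RMax CMax RMin CMin Longueur
instance (rr : Int) (cc : Int) (RMax : Int) (CMax : Int) (RMin : Int) (CMin : Int) (Longueur : Int) (out : List (Int × Int)) : Decidable (Spec_VoisinsAnneau rr cc RMax CMax RMin CMin Longueur out) := by unfold Spec_VoisinsAnneau; infer_instance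

-- ===== CLAIM (what is proved, stated in full; the proofs are below) =====
def Claim_equal_VoisinsAnneau : Prop := ∀ (rr : Int) (cc : Int) (RMax : Int) (CMax : Int) (RMin : Int) (CMin : Int) (Longueur : Int), Dom_VoisinsAnneau rr cc RMax CMax RMin CMin Longueur → Spec_VoisinsAnneau rr cc RMax CMax RMin CMin Longueur (VoisinsAnneau rr cc RMax CMax RMin CMin Longueur)

-- ===== LEMMAS AND PROOFS =====

-- the loop recursions are filter/map/flatMap
lemma pvDirInner_eq (i : Int) (js : List Int) :
    pvDirInner i js = (js.filter (fun j => decide ((i, j) ≠ ((0 : Int), (0 : Int))))).map (Prod.mk i) := by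
  induction js with
  | nil => rfl
  | cons j rest ih =>
    rw [pvDirInner, List.filter_cons]
    by_cases h : (i, j) ≠ ((0 : Int), (0 : Int))
    · rw [if_pos h, if_pos (by simp only [decide_eq_true_eq]; exact h), List.map_cons, ih]
    · rw [if_neg h, if_neg (by simp only [decide_eq_true_eq]; exact h), ih]

lemma pvDirections_eq (is js : List Int) :
    pvDirections is js = is.flatMap (fun i => pvDirInner i js) := by
  induction is with
  | nil => rfl
  | cons i rest ih => rw [pvDirections, List.flatMap_cons, ih]

lemma pvResLoop_eq (rr cc RMax CMax RMin CMin : Int) (ds : List (Int × Int)) :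
    pvResLoop rr cc RMax CMax RMin CMin ds
      = (ds.filter (fun d =>
          decide ((RMin ≤ rr + d.1 ∧ rr + d.1 < RMax) ∧ (CMin ≤ cc + d.2 ∧ cc + d.2 < CMax)))).map
        (fun d => (rr + d.1, cc + d.2)) := by
  induction ds with
  | nil => rfl
  | cons d rest ih =>
    rw [pvResLoop, List.filter_cons]
    by_cases h : (RMin ≤ rr + d.1 ∧ rr + d.1 < RMax) ∧ (CMin ≤ cc + d.2 ∧ cc + d.2 < CMax)
    · rw [if_pos h, if_pos (by simpa using h), List.map_cons, ih]
    · rw [if_neg h, if_neg (by simpa using h), ih]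

lemma pvColLoop_eq (rr cc r : Int) (cs : List Int) :
    pvColLoop rr cc r cs = (cs.filter (fun c => decide ((r, c) ≠ (rr, cc)))).map (Prod.mk r) := by
  induction cs with
  | nil => rfl
  | cons c rest ih =>
    rw [pvColLoop, List.filter_cons]
    by_cases h : (r, c) ≠ (rr, cc)
    · rw [if_pos h, if_pos (by simp only [decide_eq_true_eq]; exact h), List.map_cons, ih]
    · rw [if_neg h, if_neg (by simp only [decide_eq_true_eq]; exact h), ih]

lemma pvRowLoop_eq (rr cc : Int) (cs rs : List Int) :
    pvRowLoop rr cc cs rs = rs.flatMap (fun r => pvColLoop rr cc r cs) := by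
  induction rs with
  | nil => rfl
  | cons r rest ih => rw [pvRowLoop, List.flatMap_cons, ih]

-- filtering an integer range by interval membership clamps the range
lemma filter_interval_pyRange (a b lo hi : Int) :
    (PySem.List.pyRange a b 1).filter (fun x => decide (lo ≤ x ∧ x < hi))
      = PySem.List.pyRange (max a lo) (min b hi) 1 := by
  by_cases hab : b ≤ a
  · rw [PySem.List.pyRange_one_eq_nil hab, PySem.List.pyRange_one_eq_nil (by omega)]
    rfl
  · rw [not_le] at hab
    have h : (b - (a + 1)).toNat < (b - a).toNat := by omega
    rw [PySem.List.pyRange_one_cons hab, List.filter_cons]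
    by_cases hx : lo ≤ a ∧ a < hi
    · rw [if_pos (by simpa using hx), filter_interval_pyRange (a + 1) b lo hi]
      have h1 : max a lo = a := by omega
      have h2 : max (a + 1) lo = a + 1 := by omega
      rw [h1, h2, PySem.List.pyRange_one_cons (show a < min b hi by omega)]
    · rw [if_neg (by simpa using hx), filter_interval_pyRange (a + 1) b lo hi]
      by_cases hlo : lo ≤ a
      · have e1 : PySem.List.pyRange (max (a + 1) lo) (min b hi) 1 = [] :=
          PySem.List.pyRange_one_eq_nil (by omega)
        have e2 : PySem.List.pyRange (max a lo) (min b hi) 1 = [] :=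
          PySem.List.pyRange_one_eq_nil (by omega)
        rw [e1, e2]
      · have : max (a + 1) lo = max a lo := by omega
        rw [this]
termination_by (b - a).toNat
decreasing_by all_goals omega

-- shifting an integer range
lemma map_add_pyRange (c a b : Int) :
    (PySem.List.pyRange a b 1).map (fun x => c + x) = PySem.List.pyRange (c + a) (c + b) 1 := by
  rw [PySem.List.pyRange_one, PySem.List.pyRange_one, List.map_map]
  have : c + b - (c + a) = b - a := by ring
  rw [this]
  apply List.map_congr_left
  intro k _
  simp only [Function.comp_apply]
  ring

-- flatMap over a filtered list = flatMap with empty contribution off the filter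
lemma flatMap_filter_eq_flatMap_if {α β : Type} (l : List α) (p : α → Bool) (h : α → List β) :
    (l.filter p).flatMap h = l.flatMap (fun x => if p x then h x else []) := by
  induction l with
  | nil => rfl
  | cons x xs ih =>
    rw [List.filter_cons, List.flatMap_cons]
    by_cases hx : p x = true
    · rw [if_pos hx, if_pos hx, List.flatMap_cons, ih]
    · rw [if_neg hx, if_neg hx, ih, List.nil_append]

theorem VoisinsAnneau_spec : Claim_equal_VoisinsAnneau := by
  intro rr cc RMax CMax RMin CMin L _
  unfold Spec_VoisinsAnneau VoisinsAnneau VoisinsAnneau_alt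
  rw [pvResLoop_eq, pvDirections_eq, pvRowLoop_eq]
  simp only [pvDirInner_eq, pvColLoop_eq]
  -- normalize A's side: push the bounds filter and the shift map into each row
  simp only [List.filter_flatMap, List.map_flatMap, List.filter_map, List.map_map,
    List.filter_filter, Function.comp_def]
  -- normalize B's side: un-clamp the two ranges into interval filters over full ranges
  rw [show PySem.List.pyRange (max RMin (rr - L)) (min RMax (rr + L + 1)) 1
        = (PySem.List.pyRange (rr - L) (rr + L + 1) 1).filter
            (fun x => decide (RMin ≤ x ∧ x < RMax)) from by
      rw [filter_interval_pyRange, max_comm, min_comm]]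
  rw [show PySem.List.pyRange (max CMin (cc - L)) (min CMax (cc + L + 1)) 1
        = (PySem.List.pyRange (cc - L) (cc + L + 1) 1).filter
            (fun x => decide (CMin ≤ x ∧ x < CMax)) from by
      rw [filter_interval_pyRange, max_comm, min_comm]]
  rw [flatMap_filter_eq_flatMap_if]
  rw [show PySem.List.pyRange (rr - L) (rr + L + 1) 1
        = (PySem.List.pyRange (-L) (L + 1) 1).map (fun x => rr + x) from by
      rw [map_add_pyRange]; congr 1; ring]
  rw [show PySem.List.pyRange (cc - L) (cc + L + 1) 1
        = (PySem.List.pyRange (-L) (L + 1) 1).map (fun x => cc + x) from by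
      rw [map_add_pyRange]; congr 1; ring]
  simp only [List.flatMap_map, List.filter_map, List.map_map, Function.comp_def]
  congr 1
  funext i
  by_cases hrow : RMin ≤ rr + i ∧ rr + i < RMax
  · rw [if_pos (by simpa using hrow)]
    rw [List.filter_filter]
    congr 1
    refine List.filter_congr (fun j hj => ?_)
    simp only [ne_eq, Prod.mk.injEq, ← Bool.decide_and, decide_eq_decide]
    omega
  · rw [if_neg (by simpa using hrow)]
    rw [List.filter_eq_nil_iff.mpr ?_, List.map_nil]
    intro j hj
    simp only [Bool.and_eq_true, decide_eq_true_eq]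
    tauto
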